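-- pv_equiv track=rewrite | github.com/DinisPereira-a107199/ATP2024 | Projeto/Código/sistema.py | consultarpKeyword
-- ===== SOURCE A (Python) =====
-- def consultarpKeyword(bd,palavras): #MUDADO
--     res = []
--     for pal in palavras:
--         for d in bd:
--             keywords = d.get('keywords')
--             if keywords:
--                 keywords = keywords.lower().split(", ")
--                 for elem in keywords:
--                     for i,letra in enumerate(elem):
--                         if letra == "/" or letra == "(":
--                             elem = elem[0:i]
--                     if pal.lower() == elem and d not in res:
--                         res.append(d)
--     return res
-- ===== SOURCE B (Python) =====
-- def consultarpKeyword(bd, palavras):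
--     # Inverted index: one pass over the database builds keyword -> documents,
--     # then each query word is a single dictionary lookup.
--     indice = {}
--     for d in bd:
--         kw = d.get('keywords')
--         if kw:
--             for elem in kw.lower().split(", "):
--                 corte = len(elem)
--                 for i, ch in enumerate(elem):
--                     if ch == "/" or ch == "(":
--                         corte = i
--                         break
--                 indice.setdefault(elem[:corte], []).append(d)
--     res = []
--     for pal in palavras:
--         for d in indice.get(pal.lower(), []):
--             if d not in res:
--                 res.append(d)
--     return res
-- ===== Notes on version B (the rewrite author's own statement) =====
-- stated objective: faster
-- what changed: B builds an inverted index (cleaned keyword -> documents) in one pass over the database and answers each query word with a single dictionary lookup, instead of A's rescan of every document and every keyword for every query word.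
import Mathlib
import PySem

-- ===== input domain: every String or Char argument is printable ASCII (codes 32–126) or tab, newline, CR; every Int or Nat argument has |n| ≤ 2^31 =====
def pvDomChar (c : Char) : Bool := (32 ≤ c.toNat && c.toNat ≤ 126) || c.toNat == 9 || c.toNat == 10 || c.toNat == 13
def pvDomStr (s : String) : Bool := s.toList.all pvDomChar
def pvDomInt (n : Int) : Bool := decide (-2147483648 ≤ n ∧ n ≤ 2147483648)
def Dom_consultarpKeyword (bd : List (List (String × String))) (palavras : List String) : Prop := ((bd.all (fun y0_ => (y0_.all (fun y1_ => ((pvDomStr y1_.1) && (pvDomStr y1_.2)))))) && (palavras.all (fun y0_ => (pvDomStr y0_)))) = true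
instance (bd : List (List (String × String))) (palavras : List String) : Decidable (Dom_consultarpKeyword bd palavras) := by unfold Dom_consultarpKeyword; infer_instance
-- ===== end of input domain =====

-- B replaces A's three nested scans (every word × every document × every keyword)
-- with an inverted index built in one pass (cleaned keyword → documents), then one
-- dictionary lookup per query word; same return value.

-- ===== PORT A =====
-- inner loop 'for i,letra in enumerate(elem): if letra=="/" or letra=="(": elem = elem[0:i]'
def pvCleanA (elem : String) : String :=
  (PySem.List.enumerate elem.toList).foldl
    (fun cur p => if p.2 = '/' ∨ p.2 = '(' then PySem.Str.slice cur (some 0) (some p.1) else cur)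
    elem

def consultarpKeyword (bd : List (List (String × String))) (palavras : List String) : List (List (String × String)) :=
  palavras.foldl (fun res pal =>
    bd.foldl (fun res d =>
      match List.lookup "keywords" d with
      | none => res
      | some kw =>
        if kw = "" then res
        else
          ((PySem.Str.split? (PySem.Str.lower kw) ", ").getD []).foldl
            (fun res elem =>
              if PySem.Str.lower pal = pvCleanA elem ∧ d ∉ res then res ++ [d] else res)
            res)
      res)
    []

-- ===== PORT B =====
-- 'corte = len(elem); for i, ch in enumerate(elem): if ch == "/" or ch == "(": corte = i; break'
def pvCorteB : List Char → Nat → Nat → Nat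
  | [], _, corte => corte
  | c :: rest, i, corte => if c = '/' ∨ c = '(' then i else pvCorteB rest (i + 1) corte

def pvCleanB (elem : String) : String :=
  PySem.Str.slice elem none (some ((pvCorteB elem.toList 0 elem.toList.length : Nat) : Int))

def consultarpKeyword_alt (bd : List (List (String × String))) (palavras : List String) : List (List (String × String)) :=
  let indice : PySem.Dict String (List (List (String × String))) :=
    bd.foldl (fun ind d =>
      match List.lookup "keywords" d with
      | none => ind
      | some kw =>
        if kw = "" then ind
        else
          ((PySem.Str.split? (PySem.Str.lower kw) ", ").getD []).foldl
            (fun ind elem => ind.modify (pvCleanB elem) [] (· ++ [d]))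
            ind)
      ⟨[]⟩
  palavras.foldl (fun res pal =>
    (indice.getD (PySem.Str.lower pal) []).foldl
      (fun res d => if d ∉ res then res ++ [d] else res)
      res)
    []

-- ===== PRECONDITION & SPEC =====
def Spec_consultarpKeyword (bd : List (List (String × String))) (palavras : List String) (out : List (List (String × String))) : Prop := out = consultarpKeyword_alt bd palavras
instance (bd : List (List (String × String))) (palavras : List String) (out : List (List (String × String))) : Decidable (Spec_consultarpKeyword bd palavras out) := by unfold Spec_consultarpKeyword; infer_instance

-- ===== CLAIM (what is proved, stated in full; the proofs are below) =====
def Claim_equal_consultarpKeyword : Prop := ∀ (bd : List (List (String × String))) (palavras : List String), Dom_consultarpKeyword bd palavras → Spec_consultarpKeyword bd palavras (consultarpKeyword bd palavras)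

-- ===== LEMMAS AND PROOFS =====

-- A's list-level cleaning step, used to reason about pvCleanA via String.toList
def pvStepG (cur : List Char) (p : Int × Char) : List Char :=
  if p.2 = '/' ∨ p.2 = '(' then PySem.List.slice cur (some 0) (some p.1) else cur

lemma pvSlice0_cast (cur : List Char) (n : Nat) :
    PySem.List.slice cur (some 0) (some (n : Int)) = cur.take n := by
  have h := PySem.List.slice_natCast cur 0 n
  simpa using h

-- once the kept prefix is shorter than every remaining index, A's loop leaves it alone
lemma pvFoldG_stable (cs : List Char) : ∀ (n : Nat) (cur : List Char), cur.length ≤ n →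
    (PySem.List.enumerate cs (n : Int)).foldl pvStepG cur = cur := by
  induction cs with
  | nil => intro n cur _; simp [PySem.List.enumerate]
  | cons c r ih =>
    intro n cur h
    have he : PySem.List.enumerate (c :: r) (n : Int)
        = ((n : Int), c) :: PySem.List.enumerate r ((n : Int) + 1) := rfl
    have hcast : ((n : Int) + 1) = ((n + 1 : Nat) : Int) := by push_cast; ring
    rw [he, List.foldl_cons, hcast]
    by_cases hc : c = '/' ∨ c = '('
    · have : pvStepG cur ((n : Int), c) = cur := by
        simp only [pvStepG, if_pos hc, pvSlice0_cast, List.take_of_length_le h]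
      rw [this]; exact ih (n + 1) cur (le_trans h (Nat.le_succ n))
    · have : pvStepG cur ((n : Int), c) = cur := by simp [pvStepG, hc]
      rw [this]; exact ih (n + 1) cur (le_trans h (Nat.le_succ n))

lemma pvFoldG_take (cs : List Char) : ∀ (n : Nat) (cur : List Char),
    (PySem.List.enumerate cs (n : Int)).foldl pvStepG cur = cur.take (pvCorteB cs n cur.length) := by
  induction cs with
  | nil => intro n cur; simp [PySem.List.enumerate, pvCorteB]
  | cons c r ih =>
    intro n cur
    have he : PySem.List.enumerate (c :: r) (n : Int)
        = ((n : Int), c) :: PySem.List.enumerate r ((n : Int) + 1) := rfl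
    have hcast : ((n : Int) + 1) = ((n + 1 : Nat) : Int) := by push_cast; ring
    rw [he, List.foldl_cons, hcast]
    by_cases hc : c = '/' ∨ c = '('
    · have h1 : pvStepG cur ((n : Int), c) = cur.take n := by
        simp only [pvStepG, if_pos hc, pvSlice0_cast]
      rw [h1, pvFoldG_stable r (n + 1) (cur.take n) (by simp only [List.length_take]; omega)]
      simp [pvCorteB, hc]
    · have h1 : pvStepG cur ((n : Int), c) = cur := by simp [pvStepG, hc]
      rw [h1, ih (n + 1) cur]
      simp [pvCorteB, hc]

lemma pvClean_eq (elem : String) : pvCleanA elem = pvCleanB elem := by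
  apply String.toList_inj.mp
  have hA : (pvCleanA elem).toList
      = (PySem.List.enumerate elem.toList (0 : Int)).foldl pvStepG elem.toList := by
    unfold pvCleanA
    refine (List.foldl_hom String.toList ?_).symm
    intro cur p
    by_cases hc : p.2 = '/' ∨ p.2 = '(' <;>
      simp [pvStepG, hc, PySem.Str.toList_slice, PySem.Chars.slice_eq_listSlice]
  have h0 : ((0 : Nat) : Int) = (0 : Int) := rfl
  rw [hA, ← h0, pvFoldG_take elem.toList 0 elem.toList]
  have hB : (pvCleanB elem).toList
      = elem.toList.take (pvCorteB elem.toList 0 elem.toList.length) := by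
    unfold pvCleanB
    rw [PySem.Str.toList_slice, PySem.Chars.slice_eq_listSlice,
        PySem.List.slice_to _ (by positivity)]
    simp
  rw [hB]

-- raw keyword list of a document (after lower+split, before cleaning)
def pvKws (d : List (String × String)) : List String :=
  match List.lookup "keywords" d with
  | none => []
  | some kw => if kw = "" then [] else (PySem.Str.split? (PySem.Str.lower kw) ", ").getD []

-- B's dedup-append over a block of identical documents fires at most once
lemma pvFoldDedupConst (d : List (String × String)) (l : List String) : ∀ (res : List (List (String × String))),
    l.foldl (fun r _ => if d ∉ r then r ++ [d] else r) res
      = if l ≠ [] ∧ d ∉ res then res ++ [d] else res := by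
  induction l with
  | nil => intro res; simp
  | cons b t ih =>
    intro res
    rw [List.foldl_cons]
    by_cases h : d ∈ res
    · simp only [h, not_true, and_false, if_neg, ih]
      simp [h]
    · simp only [h, not_false_iff, if_pos, ih]
      simp [h]

-- A's keyword scan appends d exactly when some cleaned keyword matches
lemma pvFoldA (pal' : String) (d : List (String × String)) (kws : List String) : ∀ (res : List (List (String × String))),
    kws.foldl (fun r e => if pal' = pvCleanA e ∧ d ∉ r then r ++ [d] else r) res
      = if (∃ e ∈ kws, pal' = pvCleanA e) ∧ d ∉ res then res ++ [d] else res := by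
  induction kws with
  | nil => intro res; simp
  | cons e t ih =>
    intro res
    rw [List.foldl_cons]
    by_cases h2 : d ∈ res
    · have hstep : (if pal' = pvCleanA e ∧ d ∉ res then res ++ [d] else res) = res := by
        simp [h2]
      rw [hstep, ih]
      simp [h2]
    · by_cases h1 : pal' = pvCleanA e
      · have hstep : (if pal' = pvCleanA e ∧ d ∉ res then res ++ [d] else res) = res ++ [d] := by
          simp [h1, h2]
        rw [hstep, ih]
        simp [h1, h2]
      · have hstep : (if pal' = pvCleanA e ∧ d ∉ res then res ++ [d] else res) = res := by
          simp [h1]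
        rw [hstep, ih]
        simp [h1]

-- the index built by B, read at key K, is exactly the matching documents in bd order
lemma pvIndiceGetD (bd : List (List (String × String))) (K : String) :
    (bd.foldl (fun ind d =>
      match List.lookup "keywords" d with
      | none => ind
      | some kw =>
        if kw = "" then ind
        else ((PySem.Str.split? (PySem.Str.lower kw) ", ").getD []).foldl
          (fun ind elem => ind.modify (pvCleanB elem) [] (· ++ [d])) ind)
      (⟨[]⟩ : PySem.Dict String (List (List (String × String))))).getD K []
    = ((bd.flatMap (fun d => (pvKws d).map (fun e => (pvCleanB e, d)))).filter
        (fun p => p.1 == K)).map (·.2) := by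
  have hstep : ∀ (ind : PySem.Dict String (List (List (String × String)))) (d : List (String × String)),
      (match List.lookup "keywords" d with
      | none => ind
      | some kw =>
        if kw = "" then ind
        else ((PySem.Str.split? (PySem.Str.lower kw) ", ").getD []).foldl
          (fun ind elem => ind.modify (pvCleanB elem) [] (· ++ [d])) ind)
      = ((pvKws d).map (fun e => (pvCleanB e, d))).foldl
          (fun ind p => ind.modify p.1 [] (· ++ [p.2])) ind := by
    intro ind d
    unfold pvKws
    cases h : List.lookup "keywords" d with
    | none => simp
    | some kw =>
      by_cases hkw : kw = ""
      · simp [hkw]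
      · simp [hkw, List.foldl_map]
  have hfold : (bd.foldl (fun ind d =>
      match List.lookup "keywords" d with
      | none => ind
      | some kw =>
        if kw = "" then ind
        else ((PySem.Str.split? (PySem.Str.lower kw) ", ").getD []).foldl
          (fun ind elem => ind.modify (pvCleanB elem) [] (· ++ [d])) ind)
      (⟨[]⟩ : PySem.Dict String (List (List (String × String)))))
      = ((bd.flatMap (fun d => (pvKws d).map (fun e => (pvCleanB e, d)))).foldl
          (fun ind p => ind.modify p.1 [] (· ++ [p.2]))
          (⟨[]⟩ : PySem.Dict String (List (List (String × String))))) := by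
    rw [List.foldl_flatMap]
    exact PySem.List.foldl_congr_mem bd _ _ _ (fun ind d _ => hstep ind d)
  rw [hfold, PySem.Dict.getD_foldl_modify_append]
  rfl

-- per-word: A's scan of the whole database equals B's walk of the index bucket
lemma pvWord_eq (bd : List (List (String × String))) (pal : String)
    (indice : PySem.Dict String (List (List (String × String))))
    (hind : indice = bd.foldl (fun ind d =>
      match List.lookup "keywords" d with
      | none => ind
      | some kw =>
        if kw = "" then ind
        else ((PySem.Str.split? (PySem.Str.lower kw) ", ").getD []).foldl
          (fun ind elem => ind.modify (pvCleanB elem) [] (· ++ [d])) ind) ⟨[]⟩) :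
    ∀ (res : List (List (String × String))),
    bd.foldl (fun res d =>
      match List.lookup "keywords" d with
      | none => res
      | some kw =>
        if kw = "" then res
        else ((PySem.Str.split? (PySem.Str.lower kw) ", ").getD []).foldl
          (fun res elem =>
            if PySem.Str.lower pal = pvCleanA elem ∧ d ∉ res then res ++ [d] else res) res)
      res
    = (indice.getD (PySem.Str.lower pal) []).foldl
        (fun res d => if d ∉ res then res ++ [d] else res) res := by
  intro res
  set K := PySem.Str.lower pal with hK
  rw [hind, pvIndiceGetD bd K, List.filter_flatMap, List.map_flatMap, List.foldl_flatMap]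
  apply PySem.List.foldl_congr_mem
  intro r d _
  -- A side: collapse the keyword scan
  have hA : (match List.lookup "keywords" d with
      | none => r
      | some kw =>
        if kw = "" then r
        else ((PySem.Str.split? (PySem.Str.lower kw) ", ").getD []).foldl
          (fun res elem => if K = pvCleanA elem ∧ d ∉ res then res ++ [d] else res) r)
      = if (∃ e ∈ pvKws d, K = pvCleanA e) ∧ d ∉ r then r ++ [d] else r := by
    cases h : List.lookup "keywords" d with
    | none =>
      have hkws : pvKws d = [] := by unfold pvKws; rw [h]
      simp [hkws]
    | some kw =>
      by_cases hkw : kw = ""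
      · have hkws : pvKws d = [] := by unfold pvKws; rw [h]; simp [hkw]
        dsimp only
        simp [hkw, hkws]
      · have hkws : pvKws d = (PySem.Str.split? (PySem.Str.lower kw) ", ").getD [] := by
          unfold pvKws; rw [h]; simp [hkw]
        dsimp only
        rw [if_neg hkw, pvFoldA K d _ r, hkws]
  rw [hA]
  -- B side: the bucket block for d is a constant list of copies of d
  simp only [List.filter_map, List.map_map, List.foldl_map]
  simp only [Function.comp_def]
  rw [pvFoldDedupConst]
  congr 1
  · -- the two guard conditions agree
    have : ((pvKws d).filter (fun e => pvCleanB e == K) ≠ []) ↔ (∃ e ∈ pvKws d, K = pvCleanA e) := by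
      rw [Ne, List.filter_eq_nil_iff]
      push_neg
      constructor
      · rintro ⟨e, he, hm⟩
        exact ⟨e, he, by rw [pvClean_eq]; exact (eq_of_beq (by simpa using hm)).symm⟩
      · rintro ⟨e, he, hm⟩
        exact ⟨e, he, by rw [pvClean_eq] at hm; simp [hm]⟩
    simp [this]

-- ===== VERDICT (by name: the statement is the Claim_ definition above) =====
theorem consultarpKeyword_spec : Claim_equal_consultarpKeyword := by
  intro bd palavras _
  show consultarpKeyword bd palavras = consultarpKeyword_alt bd palavras
  unfold consultarpKeyword consultarpKeyword_alt
  apply PySem.List.foldl_congr_mem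
  intro res pal _
  exact pvWord_eq bd pal _ rfl res
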